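-- pv_equiv track=rewrite | github.com/chboishabba/FRACDASH | scripts/derive_rank4_dataset.py | orbit_consistent_filter
-- ===== SOURCE A (Python) =====
-- from collections import defaultdict
--
-- def orbit_consistent_filter(
--     edges: set[tuple[int, int]],
--     stability: list[int],
-- ) -> set[tuple[int, int]]:
--     groups: dict[int, list[int]] = defaultdict(list)
--     for idx, value in enumerate(stability):
--         groups[int(value)].append(idx)
--     groups = {value: members for value, members in groups.items() if len(members) > 1}
--     if not groups:
--         return edges
--
--     out_by_src: dict[int, list[int]] = defaultdict(list)
--     in_by_dst: dict[int, list[int]] = defaultdict(list)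
--     for src, dst in edges:
--         out_by_src[src].append(dst)
--         in_by_dst[dst].append(src)
--
--     keep: set[tuple[int, int]] = set()
--     for src, dst in edges:
--         src_stability = stability[src]
--         dst_stability = stability[dst]
--         src_group = groups.get(src_stability, [src])
--         dst_group = groups.get(dst_stability, [dst])
--         src_ok = all(
--             any(stability[neighbor] == dst_stability for neighbor in out_by_src.get(other_src, []))
--             for other_src in src_group
--         )
--         dst_ok = all(
--             any(stability[neighbor] == src_stability for neighbor in in_by_dst.get(other_dst, []))
--             for other_dst in dst_group
--         )
--         if src_ok and dst_ok:
--             keep.add((src, dst))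
--     return keep if keep else edges
-- ===== SOURCE B (Python) =====
-- from collections import defaultdict
--
--
-- def orbit_consistent_filter(
--     edges: set[tuple[int, int]],
--     stability: list[int],
-- ) -> set[tuple[int, int]]:
--     groups: dict[int, list[int]] = defaultdict(list)
--     for idx, value in enumerate(stability):
--         groups[int(value)].append(idx)
--     groups = {value: members for value, members in groups.items() if len(members) > 1}
--     if not groups:
--         return edges
--
--     # Per-node sets of neighbour stability values (one pass over the edges).
--     out_stab: dict[int, set[int]] = defaultdict(set)
--     in_stab: dict[int, set[int]] = defaultdict(set)
--     for src, dst in edges: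
--         out_stab[src].add(stability[dst])
--         in_stab[dst].add(stability[src])
--
--     # For every non-trivial stability group, the set of neighbour stability
--     # values shared by ALL its members (an intersection per group).
--     ok_dst: dict[int, set[int]] = {}
--     ok_src: dict[int, set[int]] = {}
--     for value, members in groups.items():
--         acc_out = set(out_stab.get(members[0], set()))
--         acc_in = set(in_stab.get(members[0], set()))
--         for i in members[1:]:
--             acc_out &= out_stab.get(i, set())
--             acc_in &= in_stab.get(i, set())
--         ok_dst[value] = acc_out
--         ok_src[value] = acc_in
--
--     keep: set[tuple[int, int]] = set()
--     for src, dst in edges: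
--         a = stability[src]
--         b = stability[dst]
--         if (a not in groups or b in ok_dst[a]) and (b not in groups or a in ok_src[b]):
--             keep.add((src, dst))
--     return keep if keep else edges
-- ===== Notes on version B (the rewrite author's own statement) =====
-- stated objective: alternative
-- what changed: Instead of rescanning every orbit-group member's full neighbour list for every edge, B builds per-node neighbour-stability-value sets in one pass, intersects them once per orbit group, and decides each edge with two set lookups; it trades A's per-edge group-times-degree rescan for precomputed per-group intersections.
import Mathlib
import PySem

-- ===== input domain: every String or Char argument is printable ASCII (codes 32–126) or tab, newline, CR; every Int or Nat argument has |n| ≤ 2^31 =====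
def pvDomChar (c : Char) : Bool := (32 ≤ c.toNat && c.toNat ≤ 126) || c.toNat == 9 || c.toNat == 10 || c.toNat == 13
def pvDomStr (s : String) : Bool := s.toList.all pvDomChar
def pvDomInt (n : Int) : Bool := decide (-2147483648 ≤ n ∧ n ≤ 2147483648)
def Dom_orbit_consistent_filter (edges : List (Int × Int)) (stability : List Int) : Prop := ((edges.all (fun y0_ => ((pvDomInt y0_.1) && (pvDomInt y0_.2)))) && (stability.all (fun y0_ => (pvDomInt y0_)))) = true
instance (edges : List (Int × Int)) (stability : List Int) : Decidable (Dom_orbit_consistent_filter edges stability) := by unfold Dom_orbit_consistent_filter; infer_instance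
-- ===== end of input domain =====

-- B replaces A's per-edge rescan of whole orbit groups by per-node neighbour-stability
-- sets intersected once per group, so each edge's keep-decision is two set lookups
-- (objective: alternative). Neither program mutates its arguments.

-- ===== PORT A =====
-- stability[i]; exact under Pre_ (every used index is in range)
def pvStab (stability : List Int) (i : Int) : Int := PySem.List.pyGetD stability i 0

-- grouping stanza shared verbatim by both Pythons (defaultdict append, then filter len>1);
-- int(value) is the identity on int values
def pvGroups (stability : List Int) : PySem.Dict Int (List Int) :=
  let g := (PySem.List.enumerate stability).foldl
      (fun d p => d.modify p.2 [] (fun m => m ++ [p.1])) PySem.Dict.empty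
  PySem.Dict.mk (g.items.filter (fun q => decide (1 < q.2.length)))

-- "for src, dst in edges: out_by_src[src].append(dst); in_by_dst[dst].append(src)"
def pvAdjA (edges : List (Int × Int)) :
    PySem.Dict Int (List Int) × PySem.Dict Int (List Int) :=
  edges.foldl
    (fun d p => (d.1.modify p.1 [] (fun m => m ++ [p.2]),
                 d.2.modify p.2 [] (fun m => m ++ [p.1])))
    (PySem.Dict.empty, PySem.Dict.empty)

-- the keep loop of A
def pvKeepA (stability : List Int) (groups : PySem.Dict Int (List Int))
    (ob ib : PySem.Dict Int (List Int)) (edges : List (Int × Int)) :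
    PySem.Set (Int × Int) :=
  edges.foldl
    (fun (k : PySem.Set (Int × Int)) p =>
      let ss := pvStab stability p.1
      let ds := pvStab stability p.2
      let sg := groups.getD ss [p.1]
      let dg := groups.getD ds [p.2]
      let srcOk := sg.all (fun o => (ob.getD o []).any (fun nb => pvStab stability nb == ds))
      let dstOk := dg.all (fun o => (ib.getD o []).any (fun nb => pvStab stability nb == ss))
      if srcOk && dstOk then k.add p else k)
    PySem.Set.empty

def orbit_consistent_filter (edges : List (Int × Int)) (stability : List Int) : List (Int × Int) :=
  let groups := pvGroups stability
  if groups.items.isEmpty then edges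
  else
    let oi := pvAdjA edges
    let keep := pvKeepA stability groups oi.1 oi.2 edges
    if keep.isEmpty then edges else keep

-- ===== PORT B =====
-- "out_stab[src].add(stability[dst]); in_stab[dst].add(stability[src])"
def pvStabAdjB (stability : List Int) (edges : List (Int × Int)) :
    PySem.Dict Int (PySem.Set Int) × PySem.Dict Int (PySem.Set Int) :=
  edges.foldl
    (fun d p =>
      (d.1.insert p.1 ((d.1.getD p.1 PySem.Set.empty).add (pvStab stability p.2)),
       d.2.insert p.2 ((d.2.getD p.2 PySem.Set.empty).add (pvStab stability p.1))))
    (PySem.Dict.empty, PySem.Dict.empty)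

-- "acc_out = set(out_stab.get(members[0], set())); for i in members[1:]: acc_out &= …" (and acc_in)
def pvInter2 (outS inS : PySem.Dict Int (PySem.Set Int)) (members : List Int) :
    PySem.Set Int × PySem.Set Int :=
  let m0 := PySem.List.pyGetD members 0 0
  (PySem.List.slice members (some 1) none).foldl
    (fun acc i => (acc.1.inter (outS.getD i PySem.Set.empty),
                   acc.2.inter (inS.getD i PySem.Set.empty)))
    (PySem.Set.ofList (outS.getD m0 PySem.Set.empty),
     PySem.Set.ofList (inS.getD m0 PySem.Set.empty))

-- "for value, members in groups.items(): … ok_dst[value] = acc_out; ok_src[value] = acc_in"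
def pvOkB (outS inS : PySem.Dict Int (PySem.Set Int)) (items : List (Int × List Int)) :
    PySem.Dict Int (PySem.Set Int) × PySem.Dict Int (PySem.Set Int) :=
  items.foldl
    (fun ok q =>
      let acc := pvInter2 outS inS q.2
      (ok.1.insert q.1 acc.1, ok.2.insert q.1 acc.2))
    (PySem.Dict.empty, PySem.Dict.empty)

-- the keep loop of B
def pvKeepB (stability : List Int) (groups : PySem.Dict Int (List Int))
    (okd oks : PySem.Dict Int (PySem.Set Int)) (edges : List (Int × Int)) :
    PySem.Set (Int × Int) :=
  edges.foldl
    (fun (k : PySem.Set (Int × Int)) p =>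
      let a := pvStab stability p.1
      let b := pvStab stability p.2
      if (!groups.contains a || (okd.getD a PySem.Set.empty).contains b)
          && (!groups.contains b || (oks.getD b PySem.Set.empty).contains a)
      then k.add p else k)
    PySem.Set.empty

def orbit_consistent_filter_alt (edges : List (Int × Int)) (stability : List Int) : List (Int × Int) :=
  let groups := pvGroups stability
  if groups.items.isEmpty then edges
  else
    let st := pvStabAdjB stability edges
    let ok := pvOkB st.1 st.2 groups.items
    let keep := pvKeepB stability groups ok.1 ok.2 edges
    if keep.isEmpty then edges else keep

-- ===== PRECONDITION & SPEC =====
-- Pre_ excludes exactly the inputs on which the Python raises IndexError: some edge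
-- endpoint out of range while stability has a repeated value (otherwise A returns the
-- edges before any indexing happens).
def Pre_orbit_consistent_filter (edges : List (Int × Int)) (stability : List Int) : Prop :=
  (∀ v ∈ stability, stability.count v ≤ 1) ∨
    (∀ p ∈ edges, PySem.Raise.InRange stability.length p.1 ∧ PySem.Raise.InRange stability.length p.2)

instance (edges : List (Int × Int)) (stability : List Int) : Decidable (Pre_orbit_consistent_filter edges stability) := by
  unfold Pre_orbit_consistent_filter; infer_instance

def pvWitness_orbit_consistent_filter : (List (Int × Int)) × List Int :=
  ([(0, 1), (1, 0)], [5, 5])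

def Spec_orbit_consistent_filter (edges : List (Int × Int)) (stability : List Int) (out : List (Int × Int)) : Prop := out = orbit_consistent_filter_alt edges stability
instance (edges : List (Int × Int)) (stability : List Int) (out : List (Int × Int)) : Decidable (Spec_orbit_consistent_filter edges stability out) := by unfold Spec_orbit_consistent_filter; infer_instance

-- ===== CLAIM (what is proved, stated in full; the proofs are below) =====
def Claim_equal_orbit_consistent_filter : Prop := ∀ (edges : List (Int × Int)) (stability : List Int), Dom_orbit_consistent_filter edges stability → Pre_orbit_consistent_filter edges stability → Spec_orbit_consistent_filter edges stability (orbit_consistent_filter edges stability)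

-- ===== LEMMAS AND PROOFS =====

theorem pvGroups_keys_nodup (stability : List Int) : (pvGroups stability).keys.Nodup := by
  unfold pvGroups
  simp only []
  rw [PySem.Dict.keys_mk]
  have h1 : (((PySem.List.enumerate stability).foldl
      (fun d p => d.modify p.2 [] (fun m => m ++ [p.1])) PySem.Dict.empty).keys).Nodup :=
    PySem.Dict.nodup_keys_foldl_modify_key (PySem.List.enumerate stability)
      (fun p : Int × Int => p.2) [] (fun _ (p : Int × Int) m => m ++ [p.1])
      PySem.Dict.empty PySem.Dict.nodup_keys_empty
  have h2 := (List.filter_sublist (l := ((PySem.List.enumerate stability).foldl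
      (fun d p => d.modify p.2 [] (fun m => m ++ [p.1])) PySem.Dict.empty).items)
      (p := fun q => decide (1 < q.2.length))).map (fun x => x.1)
  exact h1.sublist h2

theorem pvGroups_mem_len {stability : List Int} {a : Int} {m : List Int}
    (h : (a, m) ∈ (pvGroups stability).items) : 1 < m.length := by
  unfold pvGroups at h
  simp only [List.mem_filter] at h
  simpa using h.2

theorem pvAdjA_fst (edges : List (Int × Int)) (o : Int) :
    (pvAdjA edges).1.getD o [] = (edges.filter (fun p => p.1 == o)).map (·.2) := by
  unfold pvAdjA
  rw [PySem.List.foldl_prod_mk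
      (fun (d : PySem.Dict Int (List Int)) (p : Int × Int) => d.modify p.1 [] (fun m => m ++ [p.2]))
      (fun (d : PySem.Dict Int (List Int)) (p : Int × Int) => d.modify p.2 [] (fun m => m ++ [p.1]))]
  simp [PySem.Dict.getD_foldl_modify_append]

theorem pvAdjA_snd (edges : List (Int × Int)) (o : Int) :
    (pvAdjA edges).2.getD o [] = (edges.filter (fun p => p.2 == o)).map (·.1) := by
  unfold pvAdjA
  rw [PySem.List.foldl_prod_mk
      (fun (d : PySem.Dict Int (List Int)) (p : Int × Int) => d.modify p.1 [] (fun m => m ++ [p.2]))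
      (fun (d : PySem.Dict Int (List Int)) (p : Int × Int) => d.modify p.2 [] (fun m => m ++ [p.1]))]
  have h := PySem.Dict.getD_foldl_modify_append (edges.map (fun p => (p.2, p.1)))
      (PySem.Dict.empty (κ := Int) (ν := List Int)) o
  rw [List.foldl_map] at h
  simpa [List.filter_map, Function.comp] using h

theorem foldl_insert_stab_mem (f g : Int × Int → Int) (edges : List (Int × Int))
    (d : PySem.Dict Int (PySem.Set Int)) (o b : Int) :
    b ∈ (edges.foldl (fun d p => d.insert (f p) ((d.getD (f p) PySem.Set.empty).add (g p))) d).getD o PySem.Set.empty ↔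
      b ∈ d.getD o PySem.Set.empty ∨ ∃ p ∈ edges, f p = o ∧ g p = b := by
  induction edges generalizing d with
  | nil => simp
  | cons x xs ih =>
      rw [List.foldl_cons, ih, PySem.Dict.getD_insert]
      by_cases ho : o = f x
      · subst ho
        rw [if_pos rfl, PySem.Set.mem_add, List.exists_mem_cons_iff]
        have hgb : (g x = b) ↔ (b = g x) := eq_comm
        tauto
      · have ho' : ¬ (f x = o ∧ g x = b) := fun hc => ho hc.1.symm
        simp only [if_neg ho, List.exists_mem_cons_iff]
        tauto

theorem pvStabAdjB_fst_mem (stability : List Int) (edges : List (Int × Int)) (o b : Int) :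
    b ∈ (pvStabAdjB stability edges).1.getD o PySem.Set.empty ↔
      ∃ p ∈ edges, p.1 = o ∧ pvStab stability p.2 = b := by
  unfold pvStabAdjB
  rw [PySem.List.foldl_prod_mk
      (fun (d : PySem.Dict Int (PySem.Set Int)) (p : Int × Int) =>
        d.insert p.1 ((d.getD p.1 PySem.Set.empty).add (pvStab stability p.2)))
      (fun (d : PySem.Dict Int (PySem.Set Int)) (p : Int × Int) =>
        d.insert p.2 ((d.getD p.2 PySem.Set.empty).add (pvStab stability p.1)))]
  rw [foldl_insert_stab_mem (fun p => p.1) (fun p => pvStab stability p.2)]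
  simp

theorem pvStabAdjB_snd_mem (stability : List Int) (edges : List (Int × Int)) (o b : Int) :
    b ∈ (pvStabAdjB stability edges).2.getD o PySem.Set.empty ↔
      ∃ p ∈ edges, p.2 = o ∧ pvStab stability p.1 = b := by
  unfold pvStabAdjB
  rw [PySem.List.foldl_prod_mk
      (fun (d : PySem.Dict Int (PySem.Set Int)) (p : Int × Int) =>
        d.insert p.1 ((d.getD p.1 PySem.Set.empty).add (pvStab stability p.2)))
      (fun (d : PySem.Dict Int (PySem.Set Int)) (p : Int × Int) =>
        d.insert p.2 ((d.getD p.2 PySem.Set.empty).add (pvStab stability p.1)))]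
  rw [foldl_insert_stab_mem (fun p => p.2) (fun p => pvStab stability p.1)]
  simp

theorem mem_foldl_inter (f : Int → PySem.Set Int) (t : List Int) (acc : PySem.Set Int) (b : Int) :
    b ∈ t.foldl (fun a i => a.inter (f i)) acc ↔ b ∈ acc ∧ ∀ i ∈ t, b ∈ f i := by
  induction t generalizing acc with
  | nil => simp
  | cons x xs ih =>
      rw [List.foldl_cons, ih]
      rw [PySem.Set.mem_inter]
      constructor
      · rintro ⟨⟨h1, h2⟩, h3⟩
        exact ⟨h1, by simpa using ⟨h2, h3⟩⟩
      · rintro ⟨h1, h⟩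
        simp only [List.mem_cons] at h
        exact ⟨⟨h1, h x (Or.inl rfl)⟩, fun i hi => h i (Or.inr hi)⟩

theorem pvInter2_fst_mem (outS inS : PySem.Dict Int (PySem.Set Int)) (x : Int) (t : List Int) (b : Int) :
    b ∈ (pvInter2 outS inS (x :: t)).1 ↔ ∀ i ∈ x :: t, b ∈ outS.getD i PySem.Set.empty := by
  unfold pvInter2
  simp only [PySem.List.pyGetD_zero_cons]
  have hs : PySem.List.slice (x :: t) (some 1) none = t := by
    rw [PySem.List.slice_from _ (by norm_num)]; simp
  rw [hs]
  rw [PySem.List.foldl_prod_mk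
      (fun (a : PySem.Set Int) i => a.inter (outS.getD i PySem.Set.empty))
      (fun (a : PySem.Set Int) i => a.inter (inS.getD i PySem.Set.empty))]
  rw [mem_foldl_inter]
  simp [PySem.Set.mem_ofList]

theorem pvInter2_snd_mem (outS inS : PySem.Dict Int (PySem.Set Int)) (x : Int) (t : List Int) (b : Int) :
    b ∈ (pvInter2 outS inS (x :: t)).2 ↔ ∀ i ∈ x :: t, b ∈ inS.getD i PySem.Set.empty := by
  unfold pvInter2
  simp only [PySem.List.pyGetD_zero_cons]
  have hs : PySem.List.slice (x :: t) (some 1) none = t := by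
    rw [PySem.List.slice_from _ (by norm_num)]; simp
  rw [hs]
  rw [PySem.List.foldl_prod_mk
      (fun (a : PySem.Set Int) i => a.inter (outS.getD i PySem.Set.empty))
      (fun (a : PySem.Set Int) i => a.inter (inS.getD i PySem.Set.empty))]
  rw [mem_foldl_inter]
  simp [PySem.Set.mem_ofList]

theorem pvOkB_items (outS inS : PySem.Dict Int (PySem.Set Int)) (stability : List Int) :
    (pvOkB outS inS (pvGroups stability).items).1.items =
        (pvGroups stability).items.map (fun q => (q.1, (pvInter2 outS inS q.2).1)) ∧
      (pvOkB outS inS (pvGroups stability).items).2.items =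
        (pvGroups stability).items.map (fun q => (q.1, (pvInter2 outS inS q.2).2)) := by
  unfold pvOkB
  simp only []
  rw [PySem.List.foldl_prod_mk
      (fun (d : PySem.Dict Int (PySem.Set Int)) (q : Int × List Int) => d.insert q.1 (pvInter2 outS inS q.2).1)
      (fun (d : PySem.Dict Int (PySem.Set Int)) (q : Int × List Int) => d.insert q.1 (pvInter2 outS inS q.2).2)]
  have hnd : ((pvGroups stability).items.map (fun q => q.1)).Nodup := pvGroups_keys_nodup stability
  constructor
  · show (List.foldl (fun d q => d.insert q.1 (pvInter2 outS inS q.2).1) PySem.Dict.empty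
        (pvGroups stability).items).items = _
    rw [PySem.Dict.items_foldl_insert_fresh (pvGroups stability).items
        (fun q : Int × List Int => q.1) (fun q => (pvInter2 outS inS q.2).1) PySem.Dict.empty
        (fun a _ => PySem.Dict.contains_empty _) hnd]
    rfl
  · show (List.foldl (fun d q => d.insert q.1 (pvInter2 outS inS q.2).2) PySem.Dict.empty
        (pvGroups stability).items).items = _
    rw [PySem.Dict.items_foldl_insert_fresh (pvGroups stability).items
        (fun q : Int × List Int => q.1) (fun q => (pvInter2 outS inS q.2).2) PySem.Dict.empty
        (fun a _ => PySem.Dict.contains_empty _) hnd]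
    rfl

theorem pvOkB_fst_getD (outS inS : PySem.Dict Int (PySem.Set Int))
    {stability : List Int} {a : Int} {m : List Int}
    (h : (a, m) ∈ (pvGroups stability).items) :
    (pvOkB outS inS (pvGroups stability).items).1.getD a PySem.Set.empty = (pvInter2 outS inS m).1 := by
  have hitems := (pvOkB_items outS inS stability).1
  have hmem : (a, (pvInter2 outS inS m).1) ∈ (pvOkB outS inS (pvGroups stability).items).1.items := by
    rw [hitems]
    exact List.mem_map.mpr ⟨(a, m), h, rfl⟩
  refine PySem.Dict.getD_of_mem_items _ hmem ?_ _
  show ((pvOkB outS inS (pvGroups stability).items).1.items.map (fun q => q.1)).Nodup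
  rw [hitems, List.map_map]
  exact pvGroups_keys_nodup stability

theorem pvOkB_snd_getD (outS inS : PySem.Dict Int (PySem.Set Int))
    {stability : List Int} {a : Int} {m : List Int}
    (h : (a, m) ∈ (pvGroups stability).items) :
    (pvOkB outS inS (pvGroups stability).items).2.getD a PySem.Set.empty = (pvInter2 outS inS m).2 := by
  have hitems := (pvOkB_items outS inS stability).2
  have hmem : (a, (pvInter2 outS inS m).2) ∈ (pvOkB outS inS (pvGroups stability).items).2.items := by
    rw [hitems]
    exact List.mem_map.mpr ⟨(a, m), h, rfl⟩
  refine PySem.Dict.getD_of_mem_items _ hmem ?_ _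
  show ((pvOkB outS inS (pvGroups stability).items).2.items.map (fun q => q.1)).Nodup
  rw [hitems, List.map_map]
  exact pvGroups_keys_nodup stability

theorem srcOk_eq (stability : List Int) (edges : List (Int × Int)) (p : Int × Int) (hp : p ∈ edges) :
    ((pvGroups stability).getD (pvStab stability p.1) [p.1]).all
        (fun o => ((pvAdjA edges).1.getD o []).any
          (fun nb => pvStab stability nb == pvStab stability p.2))
      = (!(pvGroups stability).contains (pvStab stability p.1)
          || ((pvOkB (pvStabAdjB stability edges).1 (pvStabAdjB stability edges).2
                (pvGroups stability).items).1.getD (pvStab stability p.1) PySem.Set.empty).contains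
              (pvStab stability p.2)) := by
  have hAny : ∀ o : Int,
      ((((pvAdjA edges).1.getD o []).any
          (fun nb => pvStab stability nb == pvStab stability p.2)) = true)
        ↔ (pvStab stability p.2) ∈ (pvStabAdjB stability edges).1.getD o PySem.Set.empty := by
    intro o
    rw [pvAdjA_fst, pvStabAdjB_fst_mem]
    simp only [List.any_eq_true, List.mem_map, List.mem_filter, beq_iff_eq]
    constructor
    · rintro ⟨nb, ⟨q, ⟨hq, hq1⟩, rfl⟩, h2⟩
      exact ⟨q, hq, hq1, h2⟩
    · rintro ⟨q, hq, hq1, hq2⟩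
      exact ⟨q.2, ⟨q, ⟨hq, hq1⟩, rfl⟩, hq2⟩
  cases hg : (pvGroups stability).get? (pvStab stability p.1) with
  | none =>
      have hc : (pvGroups stability).contains (pvStab stability p.1) = false := by
        rw [PySem.Dict.contains_eq_isSome_get?, hg]; rfl
      have hgD : (pvGroups stability).getD (pvStab stability p.1) [p.1] = [p.1] := by
        rw [PySem.Dict.getD_eq_get?_getD, hg]; rfl
      have hone : (((pvAdjA edges).1.getD p.1 []).any
          (fun nb => pvStab stability nb == pvStab stability p.2)) = true :=
        (hAny p.1).mpr ((pvStabAdjB_fst_mem stability edges p.1 (pvStab stability p.2)).mpr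
          ⟨p, hp, rfl, rfl⟩)
      rw [hgD, hc]
      simp [hone]
  | some m =>
      have hc : (pvGroups stability).contains (pvStab stability p.1) = true := by
        rw [PySem.Dict.contains_eq_isSome_get?, hg]; rfl
      have hgD : (pvGroups stability).getD (pvStab stability p.1) [p.1] = m := by
        rw [PySem.Dict.getD_eq_get?_getD, hg]; rfl
      have hmem : (pvStab stability p.1, m) ∈ (pvGroups stability).items :=
        (PySem.Dict.get?_eq_some_iff_mem_items _ _ _ (pvGroups_keys_nodup stability)).mp hg
      have hlen : 1 < m.length := pvGroups_mem_len hmem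
      obtain ⟨x, t, rfl⟩ : ∃ x t, m = x :: t := by
        cases m with
        | nil => simp at hlen
        | cons x t => exact ⟨x, t, rfl⟩
      rw [hgD, hc, pvOkB_fst_getD _ _ hmem]
      rw [Bool.not_true, Bool.false_or, Bool.eq_iff_iff]
      rw [PySem.Set.contains_iff, pvInter2_fst_mem, List.all_eq_true]
      exact forall_congr' fun o => forall_congr' fun _ => hAny o

theorem dstOk_eq (stability : List Int) (edges : List (Int × Int)) (p : Int × Int) (hp : p ∈ edges) :
    ((pvGroups stability).getD (pvStab stability p.2) [p.2]).all
        (fun o => ((pvAdjA edges).2.getD o []).any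
          (fun nb => pvStab stability nb == pvStab stability p.1))
      = (!(pvGroups stability).contains (pvStab stability p.2)
          || ((pvOkB (pvStabAdjB stability edges).1 (pvStabAdjB stability edges).2
                (pvGroups stability).items).2.getD (pvStab stability p.2) PySem.Set.empty).contains
              (pvStab stability p.1)) := by
  have hAny : ∀ o : Int,
      ((((pvAdjA edges).2.getD o []).any
          (fun nb => pvStab stability nb == pvStab stability p.1)) = true)
        ↔ (pvStab stability p.1) ∈ (pvStabAdjB stability edges).2.getD o PySem.Set.empty := by
    intro o
    rw [pvAdjA_snd, pvStabAdjB_snd_mem]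
    simp only [List.any_eq_true, List.mem_map, List.mem_filter, beq_iff_eq]
    constructor
    · rintro ⟨nb, ⟨q, ⟨hq, hq1⟩, rfl⟩, h2⟩
      exact ⟨q, hq, hq1, h2⟩
    · rintro ⟨q, hq, hq1, hq2⟩
      exact ⟨q.1, ⟨q, ⟨hq, hq1⟩, rfl⟩, hq2⟩
  cases hg : (pvGroups stability).get? (pvStab stability p.2) with
  | none =>
      have hc : (pvGroups stability).contains (pvStab stability p.2) = false := by
        rw [PySem.Dict.contains_eq_isSome_get?, hg]; rfl
      have hgD : (pvGroups stability).getD (pvStab stability p.2) [p.2] = [p.2] := by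
        rw [PySem.Dict.getD_eq_get?_getD, hg]; rfl
      have hone : (((pvAdjA edges).2.getD p.2 []).any
          (fun nb => pvStab stability nb == pvStab stability p.1)) = true :=
        (hAny p.2).mpr ((pvStabAdjB_snd_mem stability edges p.2 (pvStab stability p.1)).mpr
          ⟨p, hp, rfl, rfl⟩)
      rw [hgD, hc]
      simp [hone]
  | some m =>
      have hc : (pvGroups stability).contains (pvStab stability p.2) = true := by
        rw [PySem.Dict.contains_eq_isSome_get?, hg]; rfl
      have hgD : (pvGroups stability).getD (pvStab stability p.2) [p.2] = m := by
        rw [PySem.Dict.getD_eq_get?_getD, hg]; rfl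
      have hmem : (pvStab stability p.2, m) ∈ (pvGroups stability).items :=
        (PySem.Dict.get?_eq_some_iff_mem_items _ _ _ (pvGroups_keys_nodup stability)).mp hg
      have hlen : 1 < m.length := pvGroups_mem_len hmem
      obtain ⟨x, t, rfl⟩ : ∃ x t, m = x :: t := by
        cases m with
        | nil => simp at hlen
        | cons x t => exact ⟨x, t, rfl⟩
      rw [hgD, hc, pvOkB_snd_getD _ _ hmem]
      rw [Bool.not_true, Bool.false_or, Bool.eq_iff_iff]
      rw [PySem.Set.contains_iff, pvInter2_snd_mem, List.all_eq_true]
      exact forall_congr' fun o => forall_congr' fun _ => hAny o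

theorem keep_eq (stability : List Int) (edges : List (Int × Int)) :
    pvKeepA stability (pvGroups stability) (pvAdjA edges).1 (pvAdjA edges).2 edges =
      pvKeepB stability (pvGroups stability)
        (pvOkB (pvStabAdjB stability edges).1 (pvStabAdjB stability edges).2 (pvGroups stability).items).1
        (pvOkB (pvStabAdjB stability edges).1 (pvStabAdjB stability edges).2 (pvGroups stability).items).2
        edges := by
  unfold pvKeepA pvKeepB
  apply PySem.List.foldl_congr_mem
  intro acc p hp
  simp only []
  rw [srcOk_eq stability edges p hp, dstOk_eq stability edges p hp]

-- ===== VERDICT (by name: the statement is the Claim_ definition above) =====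
theorem orbit_consistent_filter_spec : Claim_equal_orbit_consistent_filter := by
  intro edges stability _ _
  unfold Spec_orbit_consistent_filter
  unfold orbit_consistent_filter orbit_consistent_filter_alt
  simp only []
  rw [keep_eq]
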